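-- pv_equiv track=rewrite | github.com/vosslab/python-populous-nvl | populous_game/password_codec.py | encode_seed
-- ===== SOURCE A (Python) =====
-- ALPHABET: str = 'ABCDEFGHIJKLMNOPQRSTUVWXYZ'
--
-- PASSWORD_LENGTH: int = 7
--
-- MAX_SEED: int = 26 ** PASSWORD_LENGTH
--
-- def encode_seed(seed: int) -> str:
-- 	"""Encode a non-negative integer seed into a 7-letter uppercase password."""
-- 	if seed < 0:
-- 		raise ValueError('seed must be non-negative')
-- 	if seed >= MAX_SEED:
-- 		raise ValueError(f'seed >= {MAX_SEED} cannot be encoded in {PASSWORD_LENGTH} letters')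
-- 	chars = []
-- 	value = seed
-- 	for _ in range(PASSWORD_LENGTH):
-- 		chars.append(ALPHABET[value % 26])
-- 		value //= 26
-- 	# Reverse so the high-order digit comes first
-- 	password = ''.join(reversed(chars))
-- 	return password
-- ===== SOURCE B (Python) =====
-- ALPHABET: str = 'ABCDEFGHIJKLMNOPQRSTUVWXYZ'
--
-- PASSWORD_LENGTH: int = 7
--
-- MAX_SEED: int = 26 ** PASSWORD_LENGTH
--
-- def encode_seed(seed: int) -> str:
-- 	"""Encode a non-negative integer seed into a 7-letter uppercase password."""
-- 	if seed < 0: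
-- 		raise ValueError('seed must be non-negative')
-- 	if seed >= MAX_SEED:
-- 		raise ValueError(f'seed >= {MAX_SEED} cannot be encoded in {PASSWORD_LENGTH} letters')
-- 	return ''.join(ALPHABET[(seed // 26 ** i) % 26] for i in range(PASSWORD_LENGTH - 1, -1, -1))
-- ===== Notes on version B (the rewrite author's own statement) =====
-- stated objective: simpler
-- what changed: B extracts each digit directly by positional weight (seed // 26**i % 26, MSB first) and joins in one pass, instead of A's peel-remainders loop with a mutated accumulator, a char list and a final reversal.
import Mathlib
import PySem

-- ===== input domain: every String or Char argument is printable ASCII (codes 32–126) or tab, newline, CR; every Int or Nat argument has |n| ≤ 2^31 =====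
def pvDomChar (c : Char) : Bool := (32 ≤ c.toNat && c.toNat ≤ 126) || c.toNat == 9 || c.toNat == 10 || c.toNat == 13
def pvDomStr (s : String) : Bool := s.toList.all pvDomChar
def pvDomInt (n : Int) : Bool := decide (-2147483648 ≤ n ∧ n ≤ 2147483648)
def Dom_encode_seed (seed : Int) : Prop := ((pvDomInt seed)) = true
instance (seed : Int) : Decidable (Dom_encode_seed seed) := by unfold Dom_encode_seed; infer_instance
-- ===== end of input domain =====

-- B builds the password MSB-first by positional weight (seed // 26**i % 26) instead of A's
-- peel-remainders loop with an accumulator list and a final reversal (objective: simpler).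

-- ALPHABET = 'ABCDEFGHIJKLMNOPQRSTUVWXYZ'  (module constant, shared by both versions)
def pvAlphabet : List Char := "ABCDEFGHIJKLMNOPQRSTUVWXYZ".toList

-- ===== PORT A =====
-- The two 'raise ValueError' guards (seed < 0, seed >= 26**7) are exactly the inputs
-- Pre_encode_seed excludes; on admitted inputs A runs the loop below.
-- ALPHABET[value % 26] is always in range (0 ≤ value % 26 < 26), so the pyGetD default is never used.
def encode_seed (seed : Int) : String :=
  let st := (PySem.List.pyRange 0 7 1).foldl        -- for _ in range(PASSWORD_LENGTH):
      (fun (st : List Char × Int) _ =>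
        (st.1 ++ [PySem.List.pyGetD pvAlphabet (PySem.Int.mod st.2 26) 'A'],  -- chars.append(ALPHABET[value % 26])
         PySem.Int.floordiv st.2 26))                                          -- value //= 26
      ([], seed)
  String.ofList st.1.reverse                        -- ''.join(reversed(chars))

-- ===== PORT B =====
-- same guards as A (excluded by Pre_encode_seed); then one join over range(6, -1, -1)
def encode_seed_alt (seed : Int) : String :=
  String.ofList ((PySem.List.pyRange 6 (-1) (-1)).map
    (fun i => PySem.List.pyGetD pvAlphabet
        (PySem.Int.mod (PySem.Int.floordiv seed (26 ^ i.toNat)) 26) 'A'))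

-- ===== PRECONDITION & SPEC =====
-- Pre_ excludes exactly the inputs on which the Python A raises ValueError:
-- seed < 0 and seed ≥ 26**7 = 8031810176.
def Pre_encode_seed (seed : Int) : Prop := 0 ≤ seed ∧ seed < 8031810176
instance (seed : Int) : Decidable (Pre_encode_seed seed) := by unfold Pre_encode_seed; infer_instance
def pvWitness_encode_seed : Int := (12345)

def Spec_encode_seed (seed : Int) (out : String) : Prop := out = encode_seed_alt seed
instance (seed : Int) (out : String) : Decidable (Spec_encode_seed seed out) := by unfold Spec_encode_seed; infer_instance

-- ===== CLAIM (what is proved, stated in full; the proofs are below) =====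
def Claim_equal_encode_seed : Prop := ∀ (seed : Int), Dom_encode_seed seed → Pre_encode_seed seed → Spec_encode_seed seed (encode_seed seed)

-- ===== LEMMAS AND PROOFS =====

-- peeling one more factor of 26 off a floor quotient = dividing by the next power of 26
lemma fd_chain (x : Int) (k : Nat) :
    PySem.Int.floordiv (PySem.Int.floordiv x (26 ^ k)) 26 = PySem.Int.floordiv x (26 ^ (k + 1)) := by
  rw [PySem.Int.floordiv_eq_ediv_of_pos (by norm_num : (0:Int) < 26),
      PySem.Int.floordiv_eq_ediv_of_pos (by positivity),
      PySem.Int.floordiv_eq_ediv_of_pos (by positivity),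
      Int.ediv_ediv_of_nonneg (by positivity : (0:Int) ≤ 26 ^ k), pow_succ]

-- the equality in fact holds for every seed (floor division composes for positive divisors)
lemma encode_eq (seed : Int) : encode_seed seed = encode_seed_alt seed := by
  have h2 := fd_chain seed 1
  have h3 := fd_chain seed 2
  have h4 := fd_chain seed 3
  have h5 := fd_chain seed 4
  have h6 := fd_chain seed 5
  norm_num at h2 h3 h4 h5 h6
  simp only [encode_seed, encode_seed_alt,
    show PySem.List.pyRange 0 7 1 = [0,1,2,3,4,5,6] from by decide,
    show PySem.List.pyRange 6 (-1) (-1) = [6,5,4,3,2,1,0] from by decide,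
    List.foldl, List.map, List.reverse, List.nil_append]
  norm_num [h2, h3, h4, h5, h6,
    show Int.toNat 2 = 2 from rfl, show Int.toNat 3 = 3 from rfl, show Int.toNat 4 = 4 from rfl,
    show Int.toNat 5 = 5 from rfl, show Int.toNat 6 = 6 from rfl]

-- ===== VERDICT (by name: the statement is the Claim_ definition above) =====
theorem encode_seed_spec : Claim_equal_encode_seed := by
  intro seed _ _
  exact encode_eq seed
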